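-- pv_equiv track=rewrite | github.com/Megan3koO/WebServer | scripts/extractCallstacks.py | ReorderFingerprintAndCallstack
-- ===== SOURCE A (Python) =====
-- def ReorderFingerprintAndCallstack(origin : list, target : list):
--     result = []
--     if (len(origin) == 1):
--         return origin
--     for fingerprint in target:
--         for item in origin:
--             if fingerprint == item[0]:
--                 result.append(item)
--                 origin.remove(item)
--                 break
--
--     return result
-- ===== SOURCE B (Python) =====
-- # B: group origin once into a dict of FIFO queues keyed by item[0], then serve each
-- # target fingerprint from its queue via a per-key position counter -- a single
-- # grouping pass instead of A's nested scan + list.remove.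
-- # Note: A mutates its `origin` argument (removes matched items); B does not.
-- # Equivalence claimed is about the return value only.
-- def ReorderFingerprintAndCallstack(origin : list, target : list):
--     if len(origin) == 1:
--         return origin
--     queues = {}
--     for item in origin:
--         queues.setdefault(item[0], []).append(item)
--     pos = {}
--     result = []
--     for fp in target:
--         q = queues.get(fp)
--         if q is not None:
--             i = pos.get(fp, 0)
--             if i < len(q):
--                 result.append(q[i])
--                 pos[fp] = i + 1
--     return result
-- ===== Notes on version B (the rewrite author's own statement) =====
-- stated objective: alternative
-- what changed: Replaced the nested scan (for each target fingerprint, a linear search over origin plus list.remove) by a single grouping pass: a dict of ordered queues keyed by item[0], each target fingerprint served from its queue via a per-key position counter.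
-- outside the precondition, e.g. on ReorderFingerprintAndCallstack([[], ['x']], []): A returns [], B raises IndexError; on ReorderFingerprintAndCallstack([['x'], []], ['x']): A returns [['x']], B raises IndexError
import Mathlib
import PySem

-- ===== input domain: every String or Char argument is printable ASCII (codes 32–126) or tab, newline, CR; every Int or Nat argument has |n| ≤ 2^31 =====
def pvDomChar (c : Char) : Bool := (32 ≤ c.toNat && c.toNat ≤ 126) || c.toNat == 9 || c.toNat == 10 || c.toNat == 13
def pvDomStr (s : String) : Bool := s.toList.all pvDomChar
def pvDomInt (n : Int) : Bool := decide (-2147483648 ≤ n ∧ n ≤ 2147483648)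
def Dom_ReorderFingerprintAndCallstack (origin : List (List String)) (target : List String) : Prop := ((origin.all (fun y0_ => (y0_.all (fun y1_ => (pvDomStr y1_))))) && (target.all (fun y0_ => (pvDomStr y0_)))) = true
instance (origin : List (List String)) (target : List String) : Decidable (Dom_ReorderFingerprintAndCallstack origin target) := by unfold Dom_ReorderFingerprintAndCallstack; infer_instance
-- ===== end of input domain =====

-- B replaces A's nested scan + remove by a dict of ordered queues keyed by item[0],
-- built in one grouping pass and served per target fingerprint (alternative algorithm).
-- Python A mutates `origin` (removes matched items), B does not; the equivalence is
-- about the return value only.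

-- ===== PORT A =====
-- inner `for item in origin: if fingerprint == item[0] … break`; item[0] is ported as
-- item.headD "" — exact wherever item ≠ [] (A raises IndexError there; Pre_ excludes it)
def pvFindA (fp : String) : List (List String) → Option (List String)
  | [] => none
  | item :: rest => if item.headD "" == fp then some item else pvFindA fp rest

-- one iteration of A's outer loop: state = (result, remaining origin);
-- origin.remove(item) is List.erase (first element equal to item)
def pvStepA (st : List (List String) × List (List String)) (fp : String) :
    List (List String) × List (List String) :=
  match pvFindA fp st.2 with
  | some item => (st.1 ++ [item], st.2.erase item)
  | none => st

def ReorderFingerprintAndCallstack (origin : List (List String)) (target : List String) : List (List String) :=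
  if origin.length == 1 then origin
  else (target.foldl pvStepA ([], origin)).1

-- ===== PORT B =====
-- queues.setdefault(item[0], []).append(item) ported as Dict.modify (item[0], again headD "")
def pvBuildQueues (origin : List (List String)) : PySem.Dict String (List (List String)) :=
  origin.foldl (fun d item => d.modify (item.headD "") [] (· ++ [item])) PySem.Dict.empty

-- one iteration of B's serving loop: state = (result, pos); `queues` is fixed.
-- pos.get(fp, 0) is always a non-negative int in Python (starts at 0, only
-- incremented), so the counter is ported as Nat; q[i] under the guard i < len(q)
-- is the in-range indexing q[i].
def pvStepB (queues : PySem.Dict String (List (List String)))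
    (st : List (List String) × PySem.Dict String Nat) (fp : String) :
    List (List String) × PySem.Dict String Nat :=
  match queues.get? fp with
  | none => st
  | some q =>
    let i := st.2.getD fp 0
    if h : i < q.length then (st.1 ++ [q[i]], st.2.insert fp (i + 1)) else st

def ReorderFingerprintAndCallstack_alt (origin : List (List String)) (target : List String) : List (List String) :=
  if origin.length == 1 then origin
  else (target.foldl (pvStepB (pvBuildQueues origin)) ([], PySem.Dict.empty)).1

-- ===== PRECONDITION & SPEC =====
-- Pre_ excludes origins containing an empty inner list: item[0] raises IndexError on
-- them in both programs in general; A only returns on such inputs by accident of its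
-- control flow (the len==1 shortcut, an early break, or an empty target).
def Pre_ReorderFingerprintAndCallstack (origin : List (List String)) (target : List String) : Prop :=
  ∀ l ∈ origin, l ≠ []
instance (origin : List (List String)) (target : List String) : Decidable (Pre_ReorderFingerprintAndCallstack origin target) := by unfold Pre_ReorderFingerprintAndCallstack; infer_instance

def pvWitness_ReorderFingerprintAndCallstack : List (List String) × List String :=
  ([["a", "1"], ["b", "2"], ["a", "3"]], ["b", "a", "a", "c"])

def Spec_ReorderFingerprintAndCallstack (origin : List (List String)) (target : List String) (out : List (List String)) : Prop := out = ReorderFingerprintAndCallstack_alt origin target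
instance (origin : List (List String)) (target : List String) (out : List (List String)) : Decidable (Spec_ReorderFingerprintAndCallstack origin target out) := by unfold Spec_ReorderFingerprintAndCallstack; infer_instance

-- ===== CLAIM (what is proved, stated in full; the proofs are below) =====
def Claim_equal_ReorderFingerprintAndCallstack : Prop := ∀ (origin : List (List String)) (target : List String), Dom_ReorderFingerprintAndCallstack origin target → Pre_ReorderFingerprintAndCallstack origin target → Spec_ReorderFingerprintAndCallstack origin target (ReorderFingerprintAndCallstack origin target)

-- ===== LEMMAS AND PROOFS =====

-- the items of origin whose first entry is k, in order (A's "queue" for key k)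
def pvFilterK (k : String) (os : List (List String)) : List (List String) :=
  os.filter (fun it => it.headD "" == k)

theorem pvFilterK_nil (k : String) : pvFilterK k [] = [] := rfl

theorem pvFilterK_cons (k : String) (it : List String) (os : List (List String)) :
    pvFilterK k (it :: os) =
      if it.headD "" == k then it :: pvFilterK k os else pvFilterK k os := by
  simp [pvFilterK, List.filter]
  split <;> simp_all

-- A's inner scan finds exactly the head of the key-fp queue
theorem pvFindA_eq_head (fp : String) (os : List (List String)) :
    pvFindA fp os = (pvFilterK fp os).head? := by
  induction os with
  | nil => rfl
  | cons it os ih =>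
    rw [pvFindA, pvFilterK_cons]
    split <;> simp [ih]

-- erasing the found item pops the key-fp queue and leaves every other queue unchanged
theorem pvFilterK_erase (fp : String) (os : List (List String)) (x : List String)
    (rest : List (List String)) (h : pvFilterK fp os = x :: rest) (k : String) :
    pvFilterK k (os.erase x) = if k = fp then rest else pvFilterK k os := by
  induction os generalizing rest with
  | nil => simp [pvFilterK_nil] at h
  | cons it os ih =>
    rw [pvFilterK_cons] at h
    by_cases hit : it.headD "" == fp
    · rw [if_pos hit] at h
      injection h with h1 h2
      subst h1; subst h2
      rw [List.erase_cons_head]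
      by_cases hk : k = fp
      · rw [if_pos hk]; subst hk; rfl
      · rw [if_neg hk, pvFilterK_cons]
        have hfp : it.headD "" = fp := eq_of_beq hit
        rw [hfp, if_neg (fun he => hk (eq_of_beq he).symm)]
    · rw [if_neg hit] at h
      have hxne : it ≠ x := by
        intro he; subst he
        have hmem : it ∈ pvFilterK fp os := by rw [h]; exact List.mem_cons_self ..
        rw [pvFilterK] at hmem
        exact hit (List.of_mem_filter (p := fun (it : List String) => it.headD "" == fp) hmem)
      rw [List.erase_cons_tail (fun he => hxne (eq_of_beq he))]
      rw [pvFilterK_cons, ih rest h, pvFilterK_cons]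
      by_cases hk : k = fp
      · subst hk; rw [if_neg hit, if_pos rfl, if_pos rfl]
      · rw [if_neg hk, if_neg hk]

-- building the dict of queues: each key's queue is its pvFilterK sublist
theorem pvBuild_getD (os : List (List String))
    (d : PySem.Dict String (List (List String))) (k : String) :
    (os.foldl (fun d item => d.modify (item.headD "") [] (· ++ [item])) d).getD k []
      = d.getD k [] ++ pvFilterK k os := by
  induction os generalizing d with
  | nil => simp [pvFilterK_nil]
  | cons it os ih =>
    rw [List.foldl_cons, ih, PySem.Dict.getD_modify, pvFilterK_cons]
    by_cases hk : k = it.headD ""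
    · subst hk
      rw [if_pos rfl, if_pos (beq_self_eq_true _)]
      simp
    · have hb : ¬((it.headD "" == k) = true) := fun he => hk (eq_of_beq he).symm
      rw [if_neg hk, if_neg hb]

-- the serving loops agree whenever each key's remaining origin items are the
-- suffix of that key's queue from its position counter on
theorem pvLoop_eq (queues : PySem.Dict String (List (List String))) (target : List String) :
    ∀ (acc os : List (List String)) (pos : PySem.Dict String Nat),
      (∀ k, pvFilterK k os = (queues.getD k []).drop (pos.getD k 0)) →
      (target.foldl pvStepA (acc, os)).1 = (target.foldl (pvStepB queues) (acc, pos)).1 := by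
  induction target with
  | nil => intro acc os pos _; rfl
  | cons fp target ih =>
    intro acc os pos hinv
    rw [List.foldl_cons, List.foldl_cons]
    cases hq : queues.get? fp with
    | none =>
      have hQ : queues.getD fp [] = [] := by rw [PySem.Dict.getD_eq_get?_getD, hq]; rfl
      have hfk : pvFilterK fp os = [] := by rw [hinv fp, hQ, List.drop_nil]
      have hA : pvStepA (acc, os) fp = (acc, os) := by
        simp [pvStepA, pvFindA_eq_head, hfk]
      have hB : pvStepB queues (acc, pos) fp = (acc, pos) := by
        simp [pvStepB, hq]
      rw [hA, hB]; exact ih acc os pos hinv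
    | some q =>
      have hQ : queues.getD fp [] = q := by rw [PySem.Dict.getD_eq_get?_getD, hq]; rfl
      by_cases h : pos.getD fp 0 < q.length
      · -- the queue still has an item: both sides emit q[i]
        have hdrop : q.drop (pos.getD fp 0) = q[pos.getD fp 0] :: q.drop (pos.getD fp 0 + 1) :=
          (List.getElem_cons_drop h).symm
        have hfk : pvFilterK fp os = q[pos.getD fp 0] :: q.drop (pos.getD fp 0 + 1) := by
          rw [hinv fp, hQ, hdrop]
        have hA : pvStepA (acc, os) fp =
            (acc ++ [q[pos.getD fp 0]], os.erase q[pos.getD fp 0]) := by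
          simp [pvStepA, pvFindA_eq_head, hfk, List.getElem?_eq_getElem h]
        have hB : pvStepB queues (acc, pos) fp =
            (acc ++ [q[pos.getD fp 0]], pos.insert fp (pos.getD fp 0 + 1)) := by
          simp [pvStepB, hq, h]
        rw [hA, hB]
        apply ih
        intro k
        rw [pvFilterK_erase fp os _ _ hfk k, PySem.Dict.getD_insert]
        by_cases hk : k = fp
        · subst hk; rw [if_pos rfl, if_pos rfl, hQ]
        · rw [if_neg hk, if_neg hk, hinv k]
      · -- the queue for fp is exhausted: both sides skip
        have hfk : pvFilterK fp os = [] := by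
          rw [hinv fp, hQ, List.drop_eq_nil_iff.mpr (by omega)]
        have hA : pvStepA (acc, os) fp = (acc, os) := by
          simp [pvStepA, pvFindA_eq_head, hfk]
        have hB : pvStepB queues (acc, pos) fp = (acc, pos) := by
          simp [pvStepB, hq, h]
        rw [hA, hB]; exact ih acc os pos hinv

-- ===== VERDICT (by name: the statement is the Claim_ definition above) =====
theorem ReorderFingerprintAndCallstack_spec : Claim_equal_ReorderFingerprintAndCallstack := by
  intro origin target _hdom _hpre
  unfold Spec_ReorderFingerprintAndCallstack
  unfold ReorderFingerprintAndCallstack ReorderFingerprintAndCallstack_alt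
  by_cases h1 : origin.length == 1
  · rw [if_pos h1, if_pos h1]
  · rw [if_neg h1, if_neg h1]
    apply pvLoop_eq
    intro k
    unfold pvBuildQueues
    rw [pvBuild_getD]
    simp [PySem.Dict.getD_empty]
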